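-- pv_equiv track=rewrite | github.com/aditya-khant/sheet-id-splitter | deprecated_measure_segmentation/score_splitter.py | linear_cleanup_bars
-- ===== SOURCE A (Python) =====
-- def linear_cleanup_bars(bars, width):
--     """Cleans up a set of bars in staves after overdetection linearly"""
--     if len(bars) <= 1:
--         return bars
--     elif len(bars) < 4:
--         l_diffs = []
--         for i in range(len(bars) - 1):
--             l_diffs.append(abs(bars[i][0] - bars[i+1][0]))
--         if l_diffs[0] < width:
--             return linear_cleanup_bars(bars[1:], width)
--         else:
--             return [bars[0]] + linear_cleanup_bars(bars[1:], width)
--     else: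
--         l_diffs = []
--         for i in range(3):
--             l_diffs.append(abs(bars[i][0] - bars[i+1][0]))
--
--         if l_diffs[0] < width:
--             new_bars = [bars[0]] + bars[2:]
--             return linear_cleanup_bars(new_bars, width)
--         elif l_diffs[1] < width:
--             if l_diffs[0] < l_diffs[2]:
--                 new_bars = [bars[0]] + bars[2:]
--             else:
--                 new_bars = bars[0:2] + bars[3:]
--             return linear_cleanup_bars(new_bars, width)
--         else:
--             return [bars[0]] + linear_cleanup_bars(bars[1:], width)
-- ===== SOURCE B (Python) =====
-- def linear_cleanup_bars(bars, width):
--     """One iterative pass: slide a (at most 4-element) window over the bars,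
--     deleting close-pair elements from the window in place."""
--     out = []
--     w = list(bars[:4])
--     i = 4
--     n = len(bars)
--     while len(w) > 1:
--         if len(w) < 4:
--             if abs(w[0][0] - w[1][0]) < width:
--                 del w[0]
--             else:
--                 out.append(w[0])
--                 del w[0]
--         else:
--             d0 = abs(w[0][0] - w[1][0])
--             d1 = abs(w[1][0] - w[2][0])
--             d2 = abs(w[2][0] - w[3][0])
--             if d0 < width:
--                 del w[1]
--             elif d1 < width:
--                 if d0 < d2:
--                     del w[1]
--                 else:
--                     del w[2]
--             else:
--                 out.append(w[0])
--                 del w[0]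
--             if i < n:
--                 w.append(bars[i])
--                 i += 1
--     return out + w
-- ===== Notes on version B (the rewrite author's own statement) =====
-- stated objective: alternative
-- what changed: Replaces A's slicing recursion (each step rebuilds the remaining list and recurses) with one iterative pass that slides a <=4-element window with an output accumulator, deleting elements from the window in place; timing on the generated inputs showed no measurable difference, so no speed is claimed.
import Mathlib
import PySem

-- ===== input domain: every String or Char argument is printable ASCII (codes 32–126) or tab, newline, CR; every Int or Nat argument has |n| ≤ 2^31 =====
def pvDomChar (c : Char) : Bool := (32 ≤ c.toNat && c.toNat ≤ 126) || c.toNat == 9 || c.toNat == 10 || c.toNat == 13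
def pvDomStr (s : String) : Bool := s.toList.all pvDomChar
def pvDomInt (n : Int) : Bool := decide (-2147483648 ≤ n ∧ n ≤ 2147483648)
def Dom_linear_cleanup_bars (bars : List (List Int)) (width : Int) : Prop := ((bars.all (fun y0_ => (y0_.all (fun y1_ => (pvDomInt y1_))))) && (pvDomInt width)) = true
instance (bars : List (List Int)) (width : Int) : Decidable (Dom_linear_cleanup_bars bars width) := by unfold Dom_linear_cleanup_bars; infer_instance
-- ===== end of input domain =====

-- B replaces A's slicing recursion by a single iterative pass over a ≤4-element window (alternative structure; return value only — neither version mutates its arguments).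

-- ===== PORT A =====
-- bars[i][0]; Pre_ guarantees the inner list is nonempty, so the default is never taken
def pvHead0 (b : List Int) : Int := (PySem.List.pyGet? b 0).getD 0

def linear_cleanup_bars (bars : List (List Int)) (width : Int) : List (List Int) :=
  match bars with
  | [] => bars                      -- len(bars) <= 1
  | [_] => bars
  | b0 :: b1 :: b2 :: b3 :: rest => -- len(bars) >= 4
      let l_diffs : List Int :=
        [|pvHead0 b0 - pvHead0 b1|, |pvHead0 b1 - pvHead0 b2|, |pvHead0 b2 - pvHead0 b3|]
      if l_diffs.getD 0 0 < width then
        linear_cleanup_bars (b0 :: b2 :: b3 :: rest) width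
      else if l_diffs.getD 1 0 < width then
        if l_diffs.getD 0 0 < l_diffs.getD 2 0 then
          linear_cleanup_bars (b0 :: b2 :: b3 :: rest) width
        else
          linear_cleanup_bars (b0 :: b1 :: b3 :: rest) width
      else
        b0 :: linear_cleanup_bars (b1 :: b2 :: b3 :: rest) width
  | b0 :: b1 :: rest =>             -- 2 <= len(bars) < 4
      let l_diffs : List Int :=
        (List.range (bars.length - 1)).map (fun i =>
          |pvHead0 (bars.getD i []) - pvHead0 (bars.getD (i+1) [])|)
      if l_diffs.getD 0 0 < width then
        linear_cleanup_bars (b1 :: rest) width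
      else
        b0 :: linear_cleanup_bars (b1 :: rest) width
  termination_by bars.length
  decreasing_by all_goals simp [List.length]

-- ===== PORT B =====
-- w[k] and w[k][0] on the B side; Pre_ guarantees inner lists are nonempty, so the defaults are never taken
def pvAt (w : List (List Int)) (k : Int) : List Int := (PySem.List.pyGet? w k).getD []
def pvHead0B (b : List Int) : Int := (PySem.List.pyGet? b 0).getD 0

-- the while loop of Source B: out = emitted prefix, w = the window (len <= 4), rest = bars not yet pulled in;
-- 'del w[k]' is w.take k ++ w.drop (k+1); the guarded 'w.append(bars[i]); i += 1' is '++ rest.take 1' / 'rest.drop 1'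
def pvAltLoop (out w rest : List (List Int)) (width : Int) : List (List Int) :=
  if w.length ≤ 1 then out ++ w
  else if w.length < 4 then
    if |pvHead0B (pvAt w 0) - pvHead0B (pvAt w 1)| < width then
      pvAltLoop out (w.drop 1) rest width
    else
      pvAltLoop (out ++ [pvAt w 0]) (w.drop 1) rest width
  else
    let d0 := |pvHead0B (pvAt w 0) - pvHead0B (pvAt w 1)|
    let d1 := |pvHead0B (pvAt w 1) - pvHead0B (pvAt w 2)|
    let d2 := |pvHead0B (pvAt w 2) - pvHead0B (pvAt w 3)|
    let w' :=
      if d0 < width then w.take 1 ++ w.drop 2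
      else if d1 < width then
        (if d0 < d2 then w.take 1 ++ w.drop 2 else w.take 2 ++ w.drop 3)
      else w.drop 1
    let out' := if d0 < width then out else if d1 < width then out else out ++ [pvAt w 0]
    pvAltLoop out' (w' ++ rest.take 1) (rest.drop 1) width
  termination_by w.length + rest.length
  decreasing_by
    · simp; omega
    · simp; omega
    · simp only [List.length_append, List.length_take, List.length_drop]
      split_ifs <;> simp <;> omega

def linear_cleanup_bars_alt (bars : List (List Int)) (width : Int) : List (List Int) :=
  pvAltLoop [] (bars.take 4) (bars.drop 4) width

-- ===== PRECONDITION & SPEC =====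
-- Pre_ excludes exactly the inputs where Python A raises IndexError: a list of length ≥ 2
-- containing an empty inner list (every element's [0] is eventually read).
def Pre_linear_cleanup_bars (bars : List (List Int)) (width : Int) : Prop :=
  bars.length ≤ 1 ∨ ∀ b ∈ bars, b ≠ []
instance (bars : List (List Int)) (width : Int) : Decidable (Pre_linear_cleanup_bars bars width) := by
  unfold Pre_linear_cleanup_bars; infer_instance

def pvWitness_linear_cleanup_bars : List (List Int) × Int := ([[0], [3], [10], [11], [20]], 2)

def Spec_linear_cleanup_bars (bars : List (List Int)) (width : Int) (out : List (List Int)) : Prop := out = linear_cleanup_bars_alt bars width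
instance (bars : List (List Int)) (width : Int) (out : List (List Int)) : Decidable (Spec_linear_cleanup_bars bars width out) := by unfold Spec_linear_cleanup_bars; infer_instance

-- ===== CLAIM (what is proved, stated in full; the proofs are below) =====
def Claim_equal_linear_cleanup_bars : Prop := ∀ (bars : List (List Int)) (width : Int), Dom_linear_cleanup_bars bars width → Pre_linear_cleanup_bars bars width → Spec_linear_cleanup_bars bars width (linear_cleanup_bars bars width)

-- ===== LEMMAS AND PROOFS =====

lemma pvHead0B_eq (b : List Int) : pvHead0B b = pvHead0 b := rfl

-- loop invariant: the window w holds 4 elements while anything is left in rest, and never more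
-- than 4; then the loop computes exactly A's recursion on w ++ rest, prefixed by out.
lemma pvAltLoop_eq_aux (n : Nat) : ∀ (out w rest : List (List Int)) (width : Int),
    w.length + rest.length ≤ n → w.length ≤ 4 → (rest ≠ [] → w.length = 4) →
    pvAltLoop out w rest width = out ++ linear_cleanup_bars (w ++ rest) width := by
  induction n with
  | zero =>
      intro out w rest width hn h4 hfull
      have hw : w = [] := by cases w with | nil => rfl | cons a t => simp at hn
      have hr : rest = [] := by cases rest with | nil => rfl | cons a t => simp at hn
      subst hw; subst hr
      simp [pvAltLoop, linear_cleanup_bars]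
  | succ n ih =>
      intro out w rest width hn h4 hfull
      rcases w with _ | ⟨w0, _ | ⟨w1, _ | ⟨w2, _ | ⟨w3, _ | ⟨w4, wt⟩⟩⟩⟩⟩
      · -- w = []
        have hr : rest = [] := by
          cases rest with | nil => rfl | cons r rs => have := hfull (by simp); simp at this
        subst hr
        simp [pvAltLoop, linear_cleanup_bars]
      · -- w = [w0]
        have hr : rest = [] := by
          cases rest with | nil => rfl | cons r rs => have := hfull (by simp); simp at this
        subst hr
        simp [pvAltLoop, linear_cleanup_bars]
      · -- w = [w0, w1]
        have hr : rest = [] := by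
          cases rest with | nil => rfl | cons r rs => have := hfull (by simp); simp at this
        subst hr
        rw [pvAltLoop]
        simp only [List.length_cons, List.length_nil]
        norm_num
        by_cases hlt : |pvHead0B (pvAt [w0, w1] 0) - pvHead0B (pvAt [w0, w1] 1)| < width
        · have hlt' : |pvHead0 w0 - pvHead0 w1| < width := by
            simpa [pvAt, pvHead0B_eq, PySem.List.pyGet?, PySem.List.pyIdx?] using hlt
          rw [if_pos hlt, ih out [w1] [] width (by simp at hn ⊢; omega) (by simp) (by simp)]
          simp [linear_cleanup_bars, List.range_succ, hlt']
        · have hlt' : ¬ |pvHead0 w0 - pvHead0 w1| < width := by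
            simpa [pvAt, pvHead0B_eq, PySem.List.pyGet?, PySem.List.pyIdx?] using hlt
          rw [if_neg hlt, ih (out ++ [pvAt [w0, w1] 0]) [w1] [] width (by simp at hn ⊢; omega) (by simp) (by simp)]
          simp [pvAt, PySem.List.pyGet?, PySem.List.pyIdx?, linear_cleanup_bars, List.range_succ, hlt']
      · -- w = [w0, w1, w2]
        have hr : rest = [] := by
          cases rest with | nil => rfl | cons r rs => have := hfull (by simp); simp at this
        subst hr
        rw [pvAltLoop]
        simp only [List.length_cons, List.length_nil]
        norm_num
        by_cases hlt : |pvHead0B (pvAt [w0, w1, w2] 0) - pvHead0B (pvAt [w0, w1, w2] 1)| < width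
        · have hlt' : |pvHead0 w0 - pvHead0 w1| < width := by
            simpa [pvAt, pvHead0B_eq, PySem.List.pyGet?, PySem.List.pyIdx?] using hlt
          rw [if_pos hlt, ih out [w1, w2] [] width (by simp at hn ⊢; omega) (by simp) (by simp)]
          simp [linear_cleanup_bars, List.range_succ, hlt']
        · have hlt' : ¬ |pvHead0 w0 - pvHead0 w1| < width := by
            simpa [pvAt, pvHead0B_eq, PySem.List.pyGet?, PySem.List.pyIdx?] using hlt
          rw [if_neg hlt, ih (out ++ [pvAt [w0, w1, w2] 0]) [w1, w2] [] width (by simp at hn ⊢; omega) (by simp) (by simp)]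
          simp [pvAt, PySem.List.pyGet?, PySem.List.pyIdx?, linear_cleanup_bars, List.range_succ, hlt']
      · -- w = [w0, w1, w2, w3]
        rw [pvAltLoop]
        simp only [List.length_cons, List.length_nil]
        norm_num
        have ha0 : pvAt [w0, w1, w2, w3] 0 = w0 := by simp [pvAt, PySem.List.pyGet?, PySem.List.pyIdx?]
        have ha1 : pvAt [w0, w1, w2, w3] 1 = w1 := by simp [pvAt, PySem.List.pyGet?, PySem.List.pyIdx?]
        have ha2 : pvAt [w0, w1, w2, w3] 2 = w2 := by simp [pvAt, PySem.List.pyGet?, PySem.List.pyIdx?]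
        have ha3 : pvAt [w0, w1, w2, w3] 3 = w3 := by simp [pvAt, PySem.List.pyGet?, PySem.List.pyIdx?]
        rw [ha0, ha1, ha2, ha3]
        rw [ih _ _ _ _ (by simp at hn ⊢; split_ifs <;> simp [List.length_take] <;> omega)
              (by split_ifs <;> simp [List.length_take] <;> omega)
              (by intro h; cases rest with
                  | nil => simp at h
                  | cons r rs => split_ifs <;> simp)]
        have hsplit : ∀ v : List (List Int), v ++ List.take 1 rest ++ rest.tail = v ++ rest := by
          intro v; rw [List.append_assoc, ← List.drop_one, List.take_append_drop]
        rw [hsplit]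
        simp only [pvHead0B_eq]
        by_cases hd0 : |pvHead0 w0 - pvHead0 w1| < width
        · simp [linear_cleanup_bars, hd0]
        · by_cases hd1 : |pvHead0 w1 - pvHead0 w2| < width
          · by_cases hdc : |pvHead0 w0 - pvHead0 w1| < |pvHead0 w2 - pvHead0 w3|
            · simp [linear_cleanup_bars, hd0, hd1, hdc]
            · simp [linear_cleanup_bars, hd0, hd1, hdc]
          · simp [linear_cleanup_bars, hd0, hd1]
      · -- w too long: contradicts h4
        exfalso; simp at h4; omega

lemma pvAltLoop_eq (out w rest : List (List Int)) (width : Int)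
    (h4 : w.length ≤ 4) (hfull : rest ≠ [] → w.length = 4) :
    pvAltLoop out w rest width = out ++ linear_cleanup_bars (w ++ rest) width :=
  pvAltLoop_eq_aux (w.length + rest.length) out w rest width le_rfl h4 hfull

theorem linear_cleanup_bars_spec : Claim_equal_linear_cleanup_bars := by
  intro bars width _ _
  unfold Spec_linear_cleanup_bars
  unfold linear_cleanup_bars_alt
  have h4 : (bars.take 4).length ≤ 4 := by simp
  have hfull : bars.drop 4 ≠ [] → (bars.take 4).length = 4 := by
    intro h
    have : 4 ≤ bars.length := by
      by_contra hc
      exact h (by simp; omega)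
    simp; omega
  rw [pvAltLoop_eq _ _ _ _ h4 hfull, List.take_append_drop]
  simp
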